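-- pv_equiv track=rewrite | github.com/JIEUNJJING/Programmers_Python | 프로그래머스/0/120843. 공 던지기/공 던지기.py | solution
-- ===== SOURCE A (Python) =====
-- def solution(numbers, k):
--     answer = 0
--     idx = 1 # 계산 쉽게하기위해 1로 초기화
--
--     while k > 1: # k가 1보다 작아지면 종료
--         if idx + 2 <= len(numbers): # 현재 인덱스 값에 2를 더했을 때 numbers길이 안에 값이라면
--             idx += 2 # 2를 더해주고
--             k -= 1 # k는 1 감소
--         elif idx + 2 >= len(numbers): # 현재 인덱스 값에 2를 더했을 때 numbers길이를 넘어선 값이라면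
--             idx = (idx + 2) % len(numbers) # 2를 더한 값을 numbers 길이로 나눠주면 다음 친구 번호가 나옴
--             k -= 1
--     answer = idx # 현재 번호를 넘겨줌
--     return answer
-- ===== SOURCE B (Python) =====
-- def solution(numbers, k):
--     if k <= 1:
--         return 1
--     return 2 * (k - 1) % len(numbers) + 1
-- ===== Notes on version B (the rewrite author's own statement) =====
-- stated objective: faster
-- what changed: Replaces the step-by-step while loop that advances an index k-1 times by the closed-form modular expression 2*(k-1) % len(numbers) + 1.
-- intended difference: For single-element lists with k > 1, A returns 0 (an index naming no person, an artefact of (idx+2) % 1), while B returns 1, the only person's number, which is the intended value. — e.g. on solution([5], 2): A returns 0, B returns 1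
import Mathlib
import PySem

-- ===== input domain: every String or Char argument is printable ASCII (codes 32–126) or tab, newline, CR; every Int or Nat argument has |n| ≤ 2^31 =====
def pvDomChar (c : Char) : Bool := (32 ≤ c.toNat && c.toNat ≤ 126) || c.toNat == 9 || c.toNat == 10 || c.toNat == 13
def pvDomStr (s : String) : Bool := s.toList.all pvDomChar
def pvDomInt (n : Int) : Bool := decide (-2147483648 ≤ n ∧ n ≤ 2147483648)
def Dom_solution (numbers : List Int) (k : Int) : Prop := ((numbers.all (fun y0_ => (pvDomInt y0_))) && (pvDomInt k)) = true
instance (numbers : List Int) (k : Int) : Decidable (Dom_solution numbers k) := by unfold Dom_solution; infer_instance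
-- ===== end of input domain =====

-- B replaces A's O(k) step-by-step while loop by the O(1) closed form 2*(k-1) % len + 1;
-- on single-element lists with k > 1 B returns 1 where A returns 0 (stated as D_ below).

-- ===== PORT A =====
-- A's while loop: state (idx, k); n = len(numbers) is loop-invariant.
def solutionLoop (n idx k : Int) : Int :=
  if k > 1 then
    if idx + 2 ≤ n then solutionLoop n (idx + 2) (k - 1)
    else if idx + 2 ≥ n then solutionLoop n (PySem.Int.mod (idx + 2) n) (k - 1)
    else idx  -- unreachable: ¬(idx+2 ≤ n) already implies idx+2 ≥ n
  else idx
termination_by (k - 1).toNat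
decreasing_by all_goals omega

def solution (numbers : List Int) (k : Int) : Int :=
  let answer := solutionLoop (numbers.length : Int) 1 k
  answer

-- ===== PORT B =====
def solution_alt (numbers : List Int) (k : Int) : Int :=
  if k ≤ 1 then 1
  else PySem.Int.mod (2 * (k - 1)) (numbers.length : Int) + 1

-- ===== PRECONDITION & SPEC =====
-- Pre_ excludes exactly the inputs where A raises ZeroDivisionError (empty list with k > 1); B raises there too.
def Pre_solution (numbers : List Int) (k : Int) : Prop := numbers ≠ [] ∨ k ≤ 1
instance (numbers : List Int) (k : Int) : Decidable (Pre_solution numbers k) := by unfold Pre_solution; infer_instance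
def pvWitness_solution : List Int × Int := ([3, 7, 2], 5)

-- For single-element lists with k > 1, A returns 0 (an index naming no person, an artefact of (idx+2) % 1),
-- while B returns 1, the only person's number, which is the intended value.
def D_solution (numbers : List Int) (k : Int) : Prop := numbers.length = 1 ∧ k > 1
instance (numbers : List Int) (k : Int) : Decidable (D_solution numbers k) := by unfold D_solution; infer_instance

def Spec_solution (numbers : List Int) (k : Int) (out : Int) : Prop :=
  ¬ D_solution numbers k → out = solution_alt numbers k
instance (numbers : List Int) (k : Int) (out : Int) : Decidable (Spec_solution numbers k out) := by unfold Spec_solution; infer_instance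

def pvDiffWitness_solution : List Int × Int := ([5], 2)
def pvDiffWitnessOut_solution : Int × Int := (0, 1)

-- ===== CLAIM (what is proved, stated in full; the proofs are below) =====
def Claim_unchanged_solution : Prop := ∀ (numbers : List Int) (k : Int), Dom_solution numbers k → Pre_solution numbers k → Spec_solution numbers k (solution numbers k)
def Claim_changed_solution : Prop := Dom_solution (pvDiffWitness_solution.1) (pvDiffWitness_solution.2) ∧ Pre_solution (pvDiffWitness_solution.1) (pvDiffWitness_solution.2) ∧ D_solution (pvDiffWitness_solution.1) (pvDiffWitness_solution.2) ∧ solution (pvDiffWitness_solution.1) (pvDiffWitness_solution.2) = pvDiffWitnessOut_solution.1 ∧ solution_alt (pvDiffWitness_solution.1) (pvDiffWitness_solution.2) = pvDiffWitnessOut_solution.2 ∧ pvDiffWitnessOut_solution.1 ≠ pvDiffWitnessOut_solution.2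
def Claim_exact_solution : Prop := ∀ (numbers : List Int) (k : Int), Dom_solution numbers k → Pre_solution numbers k → D_solution numbers k → solution numbers k ≠ solution_alt numbers k

-- ===== LEMMAS AND PROOFS =====

-- Loop characterisation for n ≥ 2: the index follows the closed form.
-- Invariant: 1 ≤ idx ≤ n and (n = 2 → idx = 1) (idx = 2 is unreachable when n = 2).
theorem solutionLoop_closed (n : Int) (hn : 2 ≤ n) :
    ∀ (m : Nat) (k idx : Int), (k - 1).toNat = m → 1 ≤ idx → idx ≤ n → (n = 2 → idx = 1) →
      solutionLoop n idx k = if k ≤ 1 then idx else PySem.Int.mod (idx - 1 + 2 * (k - 1)) n + 1 := by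
  intro m
  induction m with
  | zero =>
      intro k idx hm h1 h2 h3
      rw [solutionLoop]
      simp only [show ¬(k > 1) by omega, if_false, show k ≤ 1 by omega, if_true]
  | succ m ih =>
      intro k idx hm h1 h2 h3
      have hk : 1 < k := by omega
      rw [solutionLoop]
      simp only [hk, if_true]
      by_cases hle : idx + 2 ≤ n
      · rw [if_pos hle, ih (k - 1) (idx + 2) (by omega) (by omega) hle (fun he => by omega)]
        rw [if_neg (by omega : ¬ k ≤ 1)]
        by_cases hk2 : k - 1 ≤ 1
        · -- k = 2: one step left, the closed form reduces to idx + 2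
          rw [if_pos hk2, PySem.Int.mod_eq_emod_of_pos (by omega)]
          rw [Int.emod_eq_of_lt (by omega) (by omega)]
          omega
        · rw [if_neg hk2]
          rw [show idx + 2 - 1 + 2 * (k - 1 - 1) = idx - 1 + 2 * (k - 1) by ring]
      · rw [if_neg hle, if_pos (by omega : idx + 2 ≥ n)]
        have hb1 : PySem.Int.mod (idx + 2) n = idx + 2 - n := by
          rw [PySem.Int.mod_eq_emod_of_pos (by omega),
            show idx + 2 = (idx + 2 - n) + n by omega, Int.add_emod_right,
            Int.emod_eq_of_lt (by omega) (by omega)]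
          omega
        rw [hb1, ih (k - 1) (idx + 2 - n) (by omega) (by omega) (by omega) (fun he => by omega)]
        rw [if_neg (by omega : ¬ k ≤ 1)]
        by_cases hk2 : k - 1 ≤ 1
        · rw [if_pos hk2, PySem.Int.mod_eq_emod_of_pos (by omega),
            show idx - 1 + 2 * (k - 1) = (idx + 1 - n) + n by omega, Int.add_emod_right,
            Int.emod_eq_of_lt (by omega) (by omega)]
          omega
        · rw [if_neg hk2,
            show idx + 2 - n - 1 + 2 * (k - 1 - 1) = (idx - 1 + 2 * (k - 1)) - n by ring,
            PySem.Int.mod_eq_emod_of_pos (by omega), PySem.Int.mod_eq_emod_of_pos (by omega),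
            Int.sub_emod_right]

-- n = 1: once the index is 0 it stays 0.
theorem solutionLoop_one_zero : ∀ (k : Int), solutionLoop 1 0 k = 0 := by
  intro k
  induction hk : (k - 1).toNat generalizing k with
  | zero =>
      rw [solutionLoop]
      simp only [show ¬(k > 1) by omega, if_false]
  | succ m ih =>
      rw [solutionLoop]
      simp only [show k > 1 by omega, if_true, show ¬((0:Int) + 2 ≤ 1) by omega, if_false,
        show (0:Int) + 2 ≥ 1 by omega, if_true]
      have h2 : PySem.Int.mod ((0:Int) + 2) 1 = 0 := by decide
      rw [h2, ih (k - 1) (by omega)]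

-- n = 1, k > 1: A's loop returns 0.
theorem solutionLoop_one (k : Int) (hk : 1 < k) : solutionLoop 1 1 k = 0 := by
  rw [solutionLoop]
  simp only [hk, if_true, show ¬((1:Int) + 2 ≤ 1) by omega, if_false,
    show (1:Int) + 2 ≥ 1 by omega, if_true]
  have h3 : PySem.Int.mod ((1:Int) + 2) 1 = 0 := by decide
  rw [h3]
  exact solutionLoop_one_zero (k - 1)

-- ===== VERDICT (by name: the statement is the Claim_ definition above) =====
theorem solution_spec : Claim_unchanged_solution := by
  intro numbers k _ hpre hnd
  unfold solution solution_alt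
  by_cases hk : k ≤ 1
  · rw [solutionLoop]
    simp only [show ¬(k > 1) by omega, if_false, hk, if_true]
  · have hne : numbers ≠ [] := by
      rcases hpre with h | h
      · exact h
      · omega
    have hn1 : 1 ≤ (numbers.length : Int) := by
      have : numbers.length ≠ 0 := fun h => hne (List.length_eq_zero_iff.mp h)
      omega
    have hn2 : 2 ≤ (numbers.length : Int) := by
      rcases (by omega : (numbers.length : Int) = 1 ∨ 2 ≤ (numbers.length : Int)) with h | h
      · exact absurd ⟨by exact_mod_cast h, by omega⟩ hnd
      · exact h
    rw [solutionLoop_closed (numbers.length : Int) hn2 (k - 1).toNat k 1 rfl (by omega) (by omega) (by omega)]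
    simp only [hk, if_false]
    norm_num

theorem solution_changed : Claim_changed_solution := by
  unfold Claim_changed_solution
  refine ⟨by decide, by decide, by decide, ?_, by decide, by decide⟩
  show solution [5] 2 = 0
  unfold solution
  exact solutionLoop_one 2 (by omega)

theorem solution_tight : Claim_exact_solution := by
  intro numbers k _ _ hd
  obtain ⟨hl, hk⟩ := hd
  have hl' : (numbers.length : Int) = 1 := by exact_mod_cast hl
  unfold solution solution_alt
  rw [hl', solutionLoop_one k hk, if_neg (by omega : ¬ k ≤ 1),
    PySem.Int.mod_eq_emod_of_pos (by omega : (0:Int) < 1), Int.emod_one]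
  norm_num
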